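-- pv_equiv track=rewrite | github.com/KVonY/11747-Project | train.py | get_doc_index_list_cut_sen
-- ===== SOURCE A (Python) =====
-- def get_doc_index_list_cut_sen(doc, token_dict, unk_dict, config):
--     ret = []
--
--     sen_start_end_list = []
--     cur_start = 0
--     max_sen_cut = config["max_sen_len"]
--
--     for index, token in enumerate(doc):
--         if token == '.':
--             if cur_start <= index - 1:
--                 sen_start_end_list.append([cur_start, index])
--             cur_start = index + 1
--
--         if token in token_dict:
--             ret.append(token_dict[token])
--         else:
--             ret.append(unk_dict[token])
--
--     if cur_start <= len(doc)-1:
--         sen_start_end_list.append([cur_start, len(doc)])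
--
--     sen_start_end_list = sen_start_end_list[0: min(max_sen_cut, len(sen_start_end_list))]
--
--     return ret, sen_start_end_list
-- ===== SOURCE B (Python) =====
-- def get_doc_index_list_cut_sen(doc, token_dict, unk_dict, config):
--     ret = [token_dict[t] if t in token_dict else unk_dict[t] for t in doc]
--     bounds = [i for i, t in enumerate(doc) if t == '.']
--     starts = [0] + [b + 1 for b in bounds]
--     ends = bounds + [len(doc)]
--     spans = [[a, e] for a, e in zip(starts, ends) if a < e]
--     return ret, spans[:config["max_sen_len"]]
-- ===== Notes on version B (the rewrite author's own statement) =====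
-- stated objective: alternative
-- what changed: A's single stateful loop carrying cur_start and conditionally appending spans is replaced by a stateless closed form: spans are obtained by zipping the boundary lists [0]+[p+1 for '.'-positions p] with positions+[len(doc)] and keeping the non-empty pairs, the token indices by a comprehension, and the truncation by a plain slice.
import Mathlib
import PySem

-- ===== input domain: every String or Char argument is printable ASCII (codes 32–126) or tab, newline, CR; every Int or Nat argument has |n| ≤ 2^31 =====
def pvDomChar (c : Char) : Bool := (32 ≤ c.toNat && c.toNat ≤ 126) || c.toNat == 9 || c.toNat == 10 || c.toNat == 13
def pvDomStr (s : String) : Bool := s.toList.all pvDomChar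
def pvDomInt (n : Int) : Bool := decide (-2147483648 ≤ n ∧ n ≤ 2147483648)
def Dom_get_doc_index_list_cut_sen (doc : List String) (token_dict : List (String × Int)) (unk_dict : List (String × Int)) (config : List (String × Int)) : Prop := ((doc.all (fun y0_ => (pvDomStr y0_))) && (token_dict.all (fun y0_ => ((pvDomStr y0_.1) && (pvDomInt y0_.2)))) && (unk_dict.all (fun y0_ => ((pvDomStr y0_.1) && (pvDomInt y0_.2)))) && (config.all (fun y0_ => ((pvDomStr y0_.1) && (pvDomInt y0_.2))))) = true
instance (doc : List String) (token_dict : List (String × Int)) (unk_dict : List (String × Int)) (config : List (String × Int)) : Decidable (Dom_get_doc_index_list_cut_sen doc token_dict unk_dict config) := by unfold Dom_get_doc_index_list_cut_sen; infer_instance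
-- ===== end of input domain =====

-- B replaces A's single stateful loop by a stateless closed form: token indices via a map,
-- sentence spans by zipping boundary lists built from the '.'-positions, truncation by a plain
-- slice; objective: alternative. Equivalence proved wherever A returns (Pre_).


-- ===== PORT A =====
-- Literal port of A's single loop over enumerate(doc) carrying (ret, sen_start_end_list, cur_start);
-- the loop body is the named helper pvStepA; getD with default 0 is only read where the Python
-- would raise KeyError (excluded by Pre_).
def pvStepA (token_dict unk_dict : List (String × Int)) (s : List Int × List (List Int) × Int) (p : Int × String) : List Int × List (List Int) × Int :=
  let sc : List (List Int) × Int :=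
    if p.2 == "." then
      ((if s.2.2 ≤ p.1 - 1 then s.2.1 ++ [[s.2.2, p.1]] else s.2.1), p.1 + 1)
    else (s.2.1, s.2.2)
  let v : Int :=
    if (PySem.Dict.mk token_dict).contains p.2 then (PySem.Dict.mk token_dict).getD p.2 0
    else (PySem.Dict.mk unk_dict).getD p.2 0
  (s.1 ++ [v], sc.1, sc.2)

def get_doc_index_list_cut_sen (doc : List String) (token_dict : List (String × Int)) (unk_dict : List (String × Int)) (config : List (String × Int)) : List Int × List (List Int) :=
  let max_sen_cut : Int := (PySem.Dict.mk config).getD "max_sen_len" 0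
  let st := (PySem.List.enumerate doc 0).foldl (pvStepA token_dict unk_dict) ([], [], 0)
  let spans := if st.2.2 ≤ (PySem.List.len doc) - 1 then st.2.1 ++ [[st.2.2, PySem.List.len doc]] else st.2.1
  (st.1, PySem.List.slice spans (some 0) (some (min max_sen_cut (PySem.List.len spans))))

-- ===== PORT B =====
-- Source B: comprehension for the indices; '.'-positions zipped as [0]+[b+1…] against bounds+[len],
-- keeping the non-empty pairs; plain slice [:max_sen_len].  No loop state at all.
def get_doc_index_list_cut_sen_alt (doc : List String) (token_dict : List (String × Int)) (unk_dict : List (String × Int)) (config : List (String × Int)) : List Int × List (List Int) :=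
  let ret := doc.map (fun t =>
    if (PySem.Dict.mk token_dict).contains t then (PySem.Dict.mk token_dict).getD t 0
    else (PySem.Dict.mk unk_dict).getD t 0)
  let bounds := ((PySem.List.enumerate doc 0).filter (fun p => p.2 == ".")).map (·.1)
  let starts := 0 :: bounds.map (· + 1)
  let ends := bounds ++ [(doc.length : Int)]
  let spans := ((starts.zip ends).filter (fun p => decide (p.1 < p.2))).map (fun p => [p.1, p.2])
  (ret, PySem.List.slice spans none (some ((PySem.Dict.mk config).getD "max_sen_len" 0)))

-- ===== PRECONDITION & SPEC =====
-- Exactly where the Python A returns: config has "max_sen_len" and every token is in token_dict or unk_dict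
-- (otherwise A raises KeyError).
def Pre_get_doc_index_list_cut_sen (doc : List String) (token_dict : List (String × Int)) (unk_dict : List (String × Int)) (config : List (String × Int)) : Prop :=
  (PySem.Dict.mk config).contains "max_sen_len" = true ∧
  ∀ t ∈ doc, (PySem.Dict.mk token_dict).contains t = true ∨ (PySem.Dict.mk unk_dict).contains t = true

instance (doc : List String) (token_dict : List (String × Int)) (unk_dict : List (String × Int)) (config : List (String × Int)) : Decidable (Pre_get_doc_index_list_cut_sen doc token_dict unk_dict config) := by unfold Pre_get_doc_index_list_cut_sen; infer_instance

def pvWitness_get_doc_index_list_cut_sen : List String × (List (String × Int)) × (List (String × Int)) × (List (String × Int)) :=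
  (["a", ".", "b"], [("a", 1)], [(".", 9), ("b", 2)], [("max_sen_len", 5)])

def Spec_get_doc_index_list_cut_sen (doc : List String) (token_dict : List (String × Int)) (unk_dict : List (String × Int)) (config : List (String × Int)) (out : List Int × List (List Int)) : Prop := out = get_doc_index_list_cut_sen_alt doc token_dict unk_dict config
instance (doc : List String) (token_dict : List (String × Int)) (unk_dict : List (String × Int)) (config : List (String × Int)) (out : List Int × List (List Int)) : Decidable (Spec_get_doc_index_list_cut_sen doc token_dict unk_dict config out) := by unfold Spec_get_doc_index_list_cut_sen; infer_instance

-- ===== CLAIM (what is proved, stated in full; the proofs are below) =====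
def Claim_equal_get_doc_index_list_cut_sen : Prop := ∀ (doc : List String) (token_dict : List (String × Int)) (unk_dict : List (String × Int)) (config : List (String × Int)), Dom_get_doc_index_list_cut_sen doc token_dict unk_dict config → Pre_get_doc_index_list_cut_sen doc token_dict unk_dict config → Spec_get_doc_index_list_cut_sen doc token_dict unk_dict config (get_doc_index_list_cut_sen doc token_dict unk_dict config)

-- ===== LEMMAS AND PROOFS =====

-- Proof-side abbreviation for the span part of A's loop state transition.
def pvSpanStep (s : List (List Int) × Int) (pos : Int) : List (List Int) × Int :=
  ((if s.2 < pos then s.1 ++ [[s.2, pos]] else s.1), pos + 1)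

-- One step of A's loop, split into its ret part and its span part.
lemma pvStepA_apply (token_dict unk_dict : List (String × Int)) (ret : List Int) (spans : List (List Int)) (cur i : Int) (t : String) :
    pvStepA token_dict unk_dict (ret, spans, cur) (i, t)
    = (ret ++ [if (PySem.Dict.mk token_dict).contains t then (PySem.Dict.mk token_dict).getD t 0
               else (PySem.Dict.mk unk_dict).getD t 0],
       if t == "." then pvSpanStep (spans, cur) i else (spans, cur)) := by
  unfold pvStepA pvSpanStep
  have hcond : (cur ≤ i - 1) = (cur < i) := by apply propext; omega
  by_cases ht : (t == ".") = true <;> simp [ht, hcond]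

-- Invariant of A's loop: it maps the tokens through the lookup and runs the span scan
-- over the '.'-positions, from any start state.
lemma loop_eq (token_dict unk_dict : List (String × Int)) (doc : List String) :
    ∀ (s0 : Int) (ret : List Int) (spans : List (List Int)) (cur : Int),
    (PySem.List.enumerate doc s0).foldl (pvStepA token_dict unk_dict) (ret, spans, cur)
    = (ret ++ doc.map (fun t =>
        if (PySem.Dict.mk token_dict).contains t then (PySem.Dict.mk token_dict).getD t 0
        else (PySem.Dict.mk unk_dict).getD t 0),
       (((PySem.List.enumerate doc s0).filter (fun p => p.2 == ".")).map (·.1)).foldl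
         pvSpanStep (spans, cur)) := by
  induction doc with
  | nil => intro s0 ret spans cur; simp [PySem.List.enumerate_nil]
  | cons x xs ih =>
    intro s0 ret spans cur
    rw [PySem.List.enumerate_cons, List.foldl_cons, pvStepA_apply]
    by_cases hx : (x == ".") = true
    · rw [if_pos hx, ih, List.filter_cons_of_pos (by simpa using hx)]
      simp [List.append_assoc]
    · rw [if_neg hx, ih, List.filter_cons_of_neg (by simpa using hx)]
      simp [List.append_assoc]

-- The span scan followed by the trailing-segment step is the zip closed form.
lemma scan_eq_zip (ps : List Int) :
    ∀ (spans : List (List Int)) (cur n : Int),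
    (if (ps.foldl pvSpanStep (spans, cur)).2 ≤ n - 1
     then (ps.foldl pvSpanStep (spans, cur)).1 ++ [[(ps.foldl pvSpanStep (spans, cur)).2, n]]
     else (ps.foldl pvSpanStep (spans, cur)).1)
    = spans ++ (((cur :: ps.map (· + 1)).zip (ps ++ [n])).filter
        (fun p => decide (p.1 < p.2))).map (fun p => [p.1, p.2]) := by
  induction ps with
  | nil =>
    intro spans cur n
    have hcond : (cur ≤ n - 1) = (cur < n) := by apply propext; omega
    by_cases h : cur < n <;> simp [hcond, h]
  | cons p ps ih =>
    intro spans cur n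
    rw [List.foldl_cons]
    simp only [List.map_cons]
    by_cases h : cur < p
    · have hstep : pvSpanStep (spans, cur) p = (spans ++ [[cur, p]], p + 1) := by
        simp [pvSpanStep, h]
      rw [hstep, ih]
      simp [h, List.append_assoc]
    · have hstep : pvSpanStep (spans, cur) p = (spans, p + 1) := by
        simp [pvSpanStep, h]
      rw [hstep, ih]
      simp [h]
-- Truncating with an explicit min(k, len) is the plain slice [:k].
lemma slice_min_len (xs : List (List Int)) (k : Int) :
    PySem.List.slice xs (some 0) (some (min k ((xs.length : Int))))
    = PySem.List.slice xs none (some k) := by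
  rw [PySem.List.slice_zero_start]
  by_cases hk : 0 ≤ k
  · have h1 : (0:Int) ≤ min k (xs.length : Int) := by omega
    rw [PySem.List.slice_to _ h1, PySem.List.slice_to _ hk]
    rcases le_total k ((xs.length : Int)) with h | h
    · rw [min_eq_left h]
    · rw [min_eq_right h, Int.toNat_natCast,
        List.take_of_length_le (le_refl _), List.take_of_length_le]
      omega
  · rw [min_eq_left (by omega : k ≤ (xs.length : Int))]

-- ===== VERDICT (by name: the statement is the Claim_ definition above) =====
theorem get_doc_index_list_cut_sen_spec : Claim_equal_get_doc_index_list_cut_sen := by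
  intro doc token_dict unk_dict config _ _
  unfold Spec_get_doc_index_list_cut_sen get_doc_index_list_cut_sen get_doc_index_list_cut_sen_alt
  simp only [loop_eq, List.nil_append, PySem.List.len_eq]
  rw [scan_eq_zip, List.nil_append, slice_min_len]
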